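-- pv_equiv track=rewrite | github.com/pwang649/3D_MAPF | mapf/core/createWarehouse3D.py | create_incomplete_2D_level
-- ===== SOURCE A (Python) =====
-- def get_x_size(aisle_length, num_of_margin, margin_gap=0):
--     # margin are defaulted to be on both sides
--     margin_occupancy = 2 * (num_of_margin + num_of_margin * margin_gap)
--     return margin_occupancy + aisle_length
--
-- def get_y_size(num_of_aisles, aisle_gap):
--     return num_of_aisles + (num_of_aisles - 1) * aisle_gap
--
-- def get_margin_size(num_of_margin, margin_gap):
--     return num_of_margin + (num_of_margin - 1) * margin_gap
--
-- def get_elevator_size(num_of_elevator, elevator_gap):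
--     return num_of_elevator + (num_of_elevator - 1) * elevator_gap
--
-- def get_node_id(x, y, z, x_size, y_size):
--     return x + x_size * y + (x_size * y_size) * z
--
-- def create_incomplete_2D_level(z_level, aisle_length, num_of_aisles, aisle_gap, num_of_elevator, connect_level_below, num_of_margin=5, margin_gap=0, elevator_gap=0):
--
--     nodes = []
--     edges = []
--     y_size = get_y_size(num_of_aisles, aisle_gap)
--     x_size = get_x_size(aisle_length, num_of_margin, margin_gap)
--     margin_size = get_margin_size(num_of_margin, margin_gap)
--     elevator_size = get_elevator_size(num_of_elevator, elevator_gap)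
--
--     occupied_aisles = [y for y in range(y_size) if y % (1 + aisle_gap) == 0]
--     occupied_columns = [x for x in range(x_size) if ((x >= margin_size and x < margin_size + elevator_size)
--                                                      or (x < x_size - margin_size and x >= x_size - margin_size - elevator_size))
--                         and (x % (1 + margin_gap) == 0)]
--
--     for y in range(y_size):
--         for x in range(x_size):
--             if y not in occupied_aisles or x not in occupied_columns:
--                 continue
--             nodes.append(
--                 [get_node_id(x, y, z_level, x_size, y_size), x, y, z_level])
--             edges.append([get_node_id(x, y, z_level - 1, x_size,
--                                       y_size), get_node_id(x, y, z_level, x_size, y_size)])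
--             if connect_level_below:
--                 edges.append([get_node_id(x, y, z_level, x_size,
--                                       y_size), get_node_id(x, y, z_level + 1, x_size, y_size)])
--     return nodes, edges
-- ===== SOURCE B (Python) =====
-- def create_incomplete_2D_level(z_level, aisle_length, num_of_aisles, aisle_gap, num_of_elevator, connect_level_below, num_of_margin=5, margin_gap=0, elevator_gap=0):
--     y_size = num_of_aisles + (num_of_aisles - 1) * aisle_gap
--     x_size = 2 * (num_of_margin + num_of_margin * margin_gap) + aisle_length
--     margin_size = num_of_margin + (num_of_margin - 1) * margin_gap
--     elevator_size = num_of_elevator + (num_of_elevator - 1) * elevator_gap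
--     plane = x_size * y_size
--
--     aisles = [y for y in range(y_size) if y % (1 + aisle_gap) == 0]
--     columns = [x for x in range(x_size) if ((x >= margin_size and x < margin_size + elevator_size)
--                                             or (x < x_size - margin_size and x >= x_size - margin_size - elevator_size))
--                and (x % (1 + margin_gap) == 0)]
--
--     nodes = [[x + x_size * y + plane * z_level, x, y, z_level]
--              for y in aisles for x in columns]
--     if connect_level_below:
--         edges = [e for n in nodes for e in ([n[0] - plane, n[0]], [n[0], n[0] + plane])]
--     else:
--         edges = [[n[0] - plane, n[0]] for n in nodes]
--     return nodes, edges
-- ===== Notes on version B (the rewrite author's own statement) =====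
-- stated objective: faster
-- what changed: B iterates directly over the precomputed occupied-aisle list x occupied-column list (building nodes by comprehension and deriving each edge from the node id by +/- one plane offset), instead of A's scan of every (y,x) cell of the full grid with list-membership tests per cell.
import Mathlib
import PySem

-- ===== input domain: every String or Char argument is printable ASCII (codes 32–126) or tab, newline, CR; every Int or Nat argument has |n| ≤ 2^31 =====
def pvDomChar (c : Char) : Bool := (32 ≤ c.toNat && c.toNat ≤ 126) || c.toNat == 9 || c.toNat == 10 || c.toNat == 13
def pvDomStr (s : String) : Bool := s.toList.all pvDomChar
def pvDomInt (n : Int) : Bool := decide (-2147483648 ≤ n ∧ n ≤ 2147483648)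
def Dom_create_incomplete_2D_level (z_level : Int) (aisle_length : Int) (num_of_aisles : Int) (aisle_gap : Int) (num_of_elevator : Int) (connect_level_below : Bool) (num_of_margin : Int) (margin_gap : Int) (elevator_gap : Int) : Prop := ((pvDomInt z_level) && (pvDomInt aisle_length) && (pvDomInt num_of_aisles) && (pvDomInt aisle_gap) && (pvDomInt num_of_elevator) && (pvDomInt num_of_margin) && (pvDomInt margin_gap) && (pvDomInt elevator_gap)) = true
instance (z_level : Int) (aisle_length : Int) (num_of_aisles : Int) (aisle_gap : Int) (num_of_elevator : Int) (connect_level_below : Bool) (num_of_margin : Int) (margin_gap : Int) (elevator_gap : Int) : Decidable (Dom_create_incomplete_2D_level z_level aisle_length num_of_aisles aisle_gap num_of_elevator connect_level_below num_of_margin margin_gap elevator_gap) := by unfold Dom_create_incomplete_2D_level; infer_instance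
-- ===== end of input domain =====

-- B replaces A's scan of the full x×y grid (with list-membership tests per cell) by a direct
-- product iteration over the precomputed occupied aisles × occupied columns (objective: faster).

-- ===== PORT A =====  (literal transliteration of Source A, incl. its module helpers)
def get_x_size (aisle_length : Int) (num_of_margin : Int) (margin_gap : Int) : Int :=
  2 * (num_of_margin + num_of_margin * margin_gap) + aisle_length

def get_y_size (num_of_aisles : Int) (aisle_gap : Int) : Int :=
  num_of_aisles + (num_of_aisles - 1) * aisle_gap

def get_margin_size (num_of_margin : Int) (margin_gap : Int) : Int :=
  num_of_margin + (num_of_margin - 1) * margin_gap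

def get_elevator_size (num_of_elevator : Int) (elevator_gap : Int) : Int :=
  num_of_elevator + (num_of_elevator - 1) * elevator_gap

def get_node_id (x y z x_size y_size : Int) : Int :=
  x + x_size * y + (x_size * y_size) * z

def create_incomplete_2D_level (z_level : Int) (aisle_length : Int) (num_of_aisles : Int) (aisle_gap : Int) (num_of_elevator : Int) (connect_level_below : Bool) (num_of_margin : Int) (margin_gap : Int) (elevator_gap : Int) : List (List Int) × List (List Int) :=
  let y_size := get_y_size num_of_aisles aisle_gap
  let x_size := get_x_size aisle_length num_of_margin margin_gap
  let margin_size := get_margin_size num_of_margin margin_gap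
  let elevator_size := get_elevator_size num_of_elevator elevator_gap
  let occupied_aisles := (PySem.List.pyRange 0 y_size 1).filter
      (fun y => PySem.Int.mod y (1 + aisle_gap) == 0)
  let occupied_columns := (PySem.List.pyRange 0 x_size 1).filter
      (fun x => ((decide (x ≥ margin_size) && decide (x < margin_size + elevator_size))
                 || (decide (x < x_size - margin_size) && decide (x ≥ x_size - margin_size - elevator_size)))
                && (PySem.Int.mod x (1 + margin_gap) == 0))
  (PySem.List.pyRange 0 y_size 1).foldl (fun s y =>
    (PySem.List.pyRange 0 x_size 1).foldl (fun s x =>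
      if !(occupied_aisles.contains y) || !(occupied_columns.contains x) then s
      else
        let nodes := s.1 ++ [[get_node_id x y z_level x_size y_size, x, y, z_level]]
        let edges := s.2 ++ [[get_node_id x y (z_level - 1) x_size y_size, get_node_id x y z_level x_size y_size]]
        let edges := if connect_level_below then
            edges ++ [[get_node_id x y z_level x_size y_size, get_node_id x y (z_level + 1) x_size y_size]]
          else edges
        (nodes, edges)) s)
    (([] : List (List Int)), ([] : List (List Int)))

-- ===== PORT B =====  (literal transliteration of Source B; n[0] on a produced node is ported as
-- .headD 0, exact here because every node list built by B is nonempty)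
def create_incomplete_2D_level_alt (z_level : Int) (aisle_length : Int) (num_of_aisles : Int) (aisle_gap : Int) (num_of_elevator : Int) (connect_level_below : Bool) (num_of_margin : Int) (margin_gap : Int) (elevator_gap : Int) : List (List Int) × List (List Int) :=
  let y_size := num_of_aisles + (num_of_aisles - 1) * aisle_gap
  let x_size := 2 * (num_of_margin + num_of_margin * margin_gap) + aisle_length
  let margin_size := num_of_margin + (num_of_margin - 1) * margin_gap
  let elevator_size := num_of_elevator + (num_of_elevator - 1) * elevator_gap
  let plane := x_size * y_size
  let aisles := (PySem.List.pyRange 0 y_size 1).filter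
      (fun y => PySem.Int.mod y (1 + aisle_gap) == 0)
  let columns := (PySem.List.pyRange 0 x_size 1).filter
      (fun x => ((decide (x ≥ margin_size) && decide (x < margin_size + elevator_size))
                 || (decide (x < x_size - margin_size) && decide (x ≥ x_size - margin_size - elevator_size)))
                && (PySem.Int.mod x (1 + margin_gap) == 0))
  let nodes := aisles.flatMap (fun y => columns.map (fun x => [x + x_size * y + plane * z_level, x, y, z_level]))
  let edges := if connect_level_below then
      nodes.flatMap (fun n => [[n.headD 0 - plane, n.headD 0], [n.headD 0, n.headD 0 + plane]])
    else
      nodes.map (fun n => [n.headD 0 - plane, n.headD 0])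
  (nodes, edges)

-- ===== PRECONDITION & SPEC =====
-- Pre_ excludes exactly the inputs on which Python A raises ZeroDivisionError: aisle_gap = -1
-- while the y-range is nonempty (the '%' in the aisle comprehension runs with modulus 0), and
-- margin_gap = -1 while some x of the range satisfies the interval test (then x_size =
-- aisle_length, margin_size = 1, and such an x exists iff aisle_length ≥ 2 and elevator_size ≥ 1).
def Pre_create_incomplete_2D_level (z_level : Int) (aisle_length : Int) (num_of_aisles : Int) (aisle_gap : Int) (num_of_elevator : Int) (connect_level_below : Bool) (num_of_margin : Int) (margin_gap : Int) (elevator_gap : Int) : Prop :=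
  (aisle_gap = -1 → num_of_aisles + (num_of_aisles - 1) * aisle_gap ≤ 0) ∧
  (margin_gap = -1 → ¬(2 ≤ aisle_length ∧ 1 ≤ num_of_elevator + (num_of_elevator - 1) * elevator_gap))
instance (z_level : Int) (aisle_length : Int) (num_of_aisles : Int) (aisle_gap : Int) (num_of_elevator : Int) (connect_level_below : Bool) (num_of_margin : Int) (margin_gap : Int) (elevator_gap : Int) : Decidable (Pre_create_incomplete_2D_level z_level aisle_length num_of_aisles aisle_gap num_of_elevator connect_level_below num_of_margin margin_gap elevator_gap) := by unfold Pre_create_incomplete_2D_level; infer_instance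

def pvWitness_create_incomplete_2D_level : Int × Int × Int × Int × Int × Bool × Int × Int × Int :=
  (0, 3, 2, 1, 1, false, 1, 0, 0)

def Spec_create_incomplete_2D_level (z_level : Int) (aisle_length : Int) (num_of_aisles : Int) (aisle_gap : Int) (num_of_elevator : Int) (connect_level_below : Bool) (num_of_margin : Int) (margin_gap : Int) (elevator_gap : Int) (out : List (List Int) × List (List Int)) : Prop := out = create_incomplete_2D_level_alt z_level aisle_length num_of_aisles aisle_gap num_of_elevator connect_level_below num_of_margin margin_gap elevator_gap
instance (z_level : Int) (aisle_length : Int) (num_of_aisles : Int) (aisle_gap : Int) (num_of_elevator : Int) (connect_level_below : Bool) (num_of_margin : Int) (margin_gap : Int) (elevator_gap : Int) (out : List (List Int) × List (List Int)) : Decidable (Spec_create_incomplete_2D_level z_level aisle_length num_of_aisles aisle_gap num_of_elevator connect_level_below num_of_margin margin_gap elevator_gap out) := by unfold Spec_create_incomplete_2D_level; infer_instance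

-- ===== CLAIM (what is proved, stated in full; the proofs are below) =====
def Claim_equal_create_incomplete_2D_level : Prop := ∀ (z_level : Int) (aisle_length : Int) (num_of_aisles : Int) (aisle_gap : Int) (num_of_elevator : Int) (connect_level_below : Bool) (num_of_margin : Int) (margin_gap : Int) (elevator_gap : Int), Dom_create_incomplete_2D_level z_level aisle_length num_of_aisles aisle_gap num_of_elevator connect_level_below num_of_margin margin_gap elevator_gap → Pre_create_incomplete_2D_level z_level aisle_length num_of_aisles aisle_gap num_of_elevator connect_level_below num_of_margin margin_gap elevator_gap → Spec_create_incomplete_2D_level z_level aisle_length num_of_aisles aisle_gap num_of_elevator connect_level_below num_of_margin margin_gap elevator_gap (create_incomplete_2D_level z_level aisle_length num_of_aisles aisle_gap num_of_elevator connect_level_below num_of_margin margin_gap elevator_gap)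

-- ===== LEMMAS AND PROOFS =====

-- inner loop of A over the column list: appends a node and one/two edges per column
theorem pv_inner_foldl (nf : Int → List Int) (ef : Int → List (List Int))
    (cols : List Int) (s : List (List Int) × List (List Int)) :
    cols.foldl (fun s x => (s.1 ++ [nf x], s.2 ++ ef x)) s
      = (s.1 ++ cols.map nf, s.2 ++ cols.flatMap ef) := by
  induction cols generalizing s with
  | nil => simp
  | cons a l ih => simp [ih, List.append_assoc]

-- outer loop of A over the aisle list
theorem pv_outer_foldl (rows : List Int)
    (f : (List (List Int) × List (List Int)) → Int → (List (List Int) × List (List Int)))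
    (N E : Int → List (List Int))
    (hf : ∀ s y, f s y = (s.1 ++ N y, s.2 ++ E y))
    (s : List (List Int) × List (List Int)) :
    rows.foldl f s = (s.1 ++ rows.flatMap N, s.2 ++ rows.flatMap E) := by
  induction rows generalizing s with
  | nil => simp
  | cons a l ih => simp [hf, ih, List.append_assoc]

-- flatMap of singletons is map (no such lemma in the library; used to align A's edge lists with B's)
theorem pv_flatMap_singleton (l : List Int) (f : Int → List Int) :
    l.flatMap (fun x => [f x]) = l.map f := by
  induction l with
  | nil => rfl
  | cons a t ih => simp [ih]

theorem pv_bridge (ysz xsz z xs ys : Int) (pA pC : Int → Bool) (cb : Bool) :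
    ((PySem.List.pyRange 0 ysz 1).foldl (fun s y =>
      (PySem.List.pyRange 0 xsz 1).foldl (fun s x =>
        if !(((PySem.List.pyRange 0 ysz 1).filter pA).contains y)
            || !(((PySem.List.pyRange 0 xsz 1).filter pC).contains x) then s
        else
          (s.1 ++ [[get_node_id x y z xs ys, x, y, z]],
           if cb then
             (s.2 ++ [[get_node_id x y (z - 1) xs ys, get_node_id x y z xs ys]])
               ++ [[get_node_id x y z xs ys, get_node_id x y (z + 1) xs ys]]
           else
             s.2 ++ [[get_node_id x y (z - 1) xs ys, get_node_id x y z xs ys]])) s)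
      (([] : List (List Int)), ([] : List (List Int))))
    = (((PySem.List.pyRange 0 ysz 1).filter pA).flatMap (fun y =>
         ((PySem.List.pyRange 0 xsz 1).filter pC).map (fun x => [x + xs * y + xs * ys * z, x, y, z])),
       if cb then
         (((PySem.List.pyRange 0 ysz 1).filter pA).flatMap (fun y =>
            ((PySem.List.pyRange 0 xsz 1).filter pC).map (fun x => [x + xs * y + xs * ys * z, x, y, z]))).flatMap
           (fun n => [[n.headD 0 - xs * ys, n.headD 0], [n.headD 0, n.headD 0 + xs * ys]])
       else
         (((PySem.List.pyRange 0 ysz 1).filter pA).flatMap (fun y =>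
            ((PySem.List.pyRange 0 xsz 1).filter pC).map (fun x => [x + xs * y + xs * ys * z, x, y, z]))).map
           (fun n => [n.headD 0 - xs * ys, n.headD 0])) := by
  have hcA : ∀ y ∈ PySem.List.pyRange 0 ysz 1,
      (((PySem.List.pyRange 0 ysz 1).filter pA).contains y) = pA y := by
    intro y hy; cases hp : pA y
    · simp [List.mem_filter, hp]
    · simp [List.mem_filter, hp, hy]
  have hcC : ∀ x ∈ PySem.List.pyRange 0 xsz 1,
      (((PySem.List.pyRange 0 xsz 1).filter pC).contains x) = pC x := by
    intro x hx; cases hp : pC x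
    · simp [List.mem_filter, hp]
    · simp [List.mem_filter, hp, hx]
  have h1 : ((PySem.List.pyRange 0 ysz 1).foldl (fun s y =>
      (PySem.List.pyRange 0 xsz 1).foldl (fun s x =>
        if !(((PySem.List.pyRange 0 ysz 1).filter pA).contains y)
            || !(((PySem.List.pyRange 0 xsz 1).filter pC).contains x) then s
        else
          (s.1 ++ [[get_node_id x y z xs ys, x, y, z]],
           if cb then
             (s.2 ++ [[get_node_id x y (z - 1) xs ys, get_node_id x y z xs ys]])
               ++ [[get_node_id x y z xs ys, get_node_id x y (z + 1) xs ys]]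
           else
             s.2 ++ [[get_node_id x y (z - 1) xs ys, get_node_id x y z xs ys]])) s)
      (([] : List (List Int)), ([] : List (List Int))))
      = ((PySem.List.pyRange 0 ysz 1).foldl (fun s y =>
          if pA y then
            ((PySem.List.pyRange 0 xsz 1).filter pC).foldl (fun s x =>
              (s.1 ++ [[get_node_id x y z xs ys, x, y, z]],
               s.2 ++ (if cb then
                   [[get_node_id x y (z - 1) xs ys, get_node_id x y z xs ys],
                    [get_node_id x y z xs ys, get_node_id x y (z + 1) xs ys]]
                 else
                   [[get_node_id x y (z - 1) xs ys, get_node_id x y z xs ys]]))) s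
          else s)
        (([] : List (List Int)), ([] : List (List Int)))) := by
    refine PySem.List.foldl_congr_mem _ _ _ _ ?_
    intro s y hy
    rw [hcA y hy]
    cases hp : pA y
    · simp
    · simp only [Bool.not_true, Bool.false_or, if_pos]
      have h2 : ((PySem.List.pyRange 0 xsz 1).foldl (fun s x =>
          if !(((PySem.List.pyRange 0 xsz 1).filter pC).contains x) then s
          else
            (s.1 ++ [[get_node_id x y z xs ys, x, y, z]],
             if cb then
               (s.2 ++ [[get_node_id x y (z - 1) xs ys, get_node_id x y z xs ys]])
                 ++ [[get_node_id x y z xs ys, get_node_id x y (z + 1) xs ys]]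
             else
               s.2 ++ [[get_node_id x y (z - 1) xs ys, get_node_id x y z xs ys]])) s)
          = ((PySem.List.pyRange 0 xsz 1).foldl (fun s x =>
              if pC x then
                (s.1 ++ [[get_node_id x y z xs ys, x, y, z]],
                 s.2 ++ (if cb then
                     [[get_node_id x y (z - 1) xs ys, get_node_id x y z xs ys],
                      [get_node_id x y z xs ys, get_node_id x y (z + 1) xs ys]]
                   else
                     [[get_node_id x y (z - 1) xs ys, get_node_id x y z xs ys]]))
              else s) s) := by
        refine PySem.List.foldl_congr_mem _ _ _ _ ?_
        intro s' x hx
        rw [hcC x hx]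
        cases hq : pC x
        · simp
        · cases cb <;> simp [List.append_assoc]
      rw [h2, PySem.List.foldl_if_eq_foldl_filter]
  rw [h1, PySem.List.foldl_if_eq_foldl_filter]
  rw [pv_outer_foldl _ _
      (fun y => ((PySem.List.pyRange 0 xsz 1).filter pC).map (fun x => [get_node_id x y z xs ys, x, y, z]))
      (fun y => ((PySem.List.pyRange 0 xsz 1).filter pC).flatMap (fun x =>
        if cb then
          [[get_node_id x y (z - 1) xs ys, get_node_id x y z xs ys],
           [get_node_id x y z xs ys, get_node_id x y (z + 1) xs ys]]
        else
          [[get_node_id x y (z - 1) xs ys, get_node_id x y z xs ys]]))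
      (fun s y => pv_inner_foldl _ _ _ s) _]
  refine Prod.ext ?_ ?_
  · simp only [get_node_id, List.nil_append]
  · cases cb
    · simp only [Bool.false_eq_true, if_false, List.nil_append, List.map_flatMap, List.map_map]
      refine List.flatMap_congr ?_
      intro y hy
      rw [pv_flatMap_singleton]
      refine List.map_congr_left ?_
      intro x hx
      simp only [Function.comp, get_node_id, List.headD_cons, List.cons.injEq, and_true]
      try and_intros
      all_goals first | trivial | ring
    · simp only [if_true, List.nil_append, List.flatMap_assoc]
      refine List.flatMap_congr ?_
      intro y hy
      rw [List.flatMap_map]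
      refine List.flatMap_congr ?_
      intro x hx
      simp only [get_node_id, List.headD_cons, List.cons.injEq, and_true]
      try and_intros
      all_goals first | trivial | ring

-- ===== VERDICT (by name: the statement is the Claim_ definition above) =====
theorem create_incomplete_2D_level_spec : Claim_equal_create_incomplete_2D_level := by
  intro z al na ag ne cb nm mg eg _ _
  unfold Spec_create_incomplete_2D_level
  exact pv_bridge (get_y_size na ag) (get_x_size al nm mg) z (get_x_size al nm mg) (get_y_size na ag)
    (fun y => PySem.Int.mod y (1 + ag) == 0)
    (fun x => ((decide (x ≥ get_margin_size nm mg) && decide (x < get_margin_size nm mg + get_elevator_size ne eg))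
               || (decide (x < get_x_size al nm mg - get_margin_size nm mg) && decide (x ≥ get_x_size al nm mg - get_margin_size nm mg - get_elevator_size ne eg)))
              && (PySem.Int.mod x (1 + mg) == 0)) cb
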